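-- pv_equiv track=rewrite | github.com/wananer/pp-Evolution-World-Assistant | plugins/world_evolution_core/service.py | _host_context_mentions
-- ===== SOURCE A (Python) =====
-- from typing import Any, Optional, Union, Tuple
--
-- def _host_context_mentions(items: list[dict[str, Any]], text: str) -> list[dict[str, Any]]:
--     matches = []
--     for item in items:
--         if not isinstance(item, dict):
--             continue
--         terms = [str(item.get("name") or "").strip(), str(item.get("kind") or "").strip()]
--         terms.extend(_extract_short_terms(item.get("description")))
--         if any(term and len(term) >= 2 and term in text for term in terms[:8]):
--             matches.append(item)
--     return matches
--
-- def _extract_short_terms(value: Any) -> list[str]: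
--     terms = []
--     current = []
--     for char in str(value or ""):
--         if "\u4e00" <= char <= "\u9fff" or char.isalnum():
--             current.append(char)
--             continue
--         if 2 <= len(current) <= 12:
--             terms.append("".join(current))
--         current = []
--     if 2 <= len(current) <= 12:
--         terms.append("".join(current))
--     return terms[:6]
-- ===== SOURCE B (Python) =====
-- from typing import Any
--
--
-- def _is_term_char(c: str) -> bool:
--     return "\u4e00" <= c <= "\u9fff" or c.isalnum()
--
--
-- def _extract_short_terms(value: Any) -> list[str]:
--     s = str(value or "")
--     terms: list[str] = []
--     i, n = 0, len(s)
--     while i < n and len(terms) < 6: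
--         if _is_term_char(s[i]):
--             j = i + 1
--             while j < n and _is_term_char(s[j]):
--                 j += 1
--             if 2 <= j - i <= 12:
--                 terms.append(s[i:j])
--             i = j
--         else:
--             i += 1
--     return terms
--
--
-- def _item_terms(item: dict) -> list[str]:
--     return [str(item.get("name") or "").strip(),
--             str(item.get("kind") or "").strip(),
--             *_extract_short_terms(item.get("description"))]
--
--
-- def _host_context_mentions(items: list, text: str) -> list:
--     tagged = [(item, _item_terms(item)) for item in items if isinstance(item, dict)]
--     lengths = {len(t) for _, ts in tagged for t in ts if len(t) >= 2}
--     index = {text[i:i + n] for n in lengths for i in range(len(text) - n + 1)}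
--     return [item for item, ts in tagged if any(len(t) >= 2 and t in index for t in ts)]
-- ===== Notes on version B (the rewrite author's own statement) =====
-- stated objective: alternative
-- what changed: B replaces A's per-term substring scans over the text with a precomputed substring index: it tags each item with its terms in staged passes (using a two-pointer tokenizer that stops after 6 runs instead of A's accumulator/flush state machine), collects the set of needed term lengths, builds the hash set of all substrings of the text of those lengths once, and filters items by set lookups instead of repeated 'term in text' scans.
import Mathlib
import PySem

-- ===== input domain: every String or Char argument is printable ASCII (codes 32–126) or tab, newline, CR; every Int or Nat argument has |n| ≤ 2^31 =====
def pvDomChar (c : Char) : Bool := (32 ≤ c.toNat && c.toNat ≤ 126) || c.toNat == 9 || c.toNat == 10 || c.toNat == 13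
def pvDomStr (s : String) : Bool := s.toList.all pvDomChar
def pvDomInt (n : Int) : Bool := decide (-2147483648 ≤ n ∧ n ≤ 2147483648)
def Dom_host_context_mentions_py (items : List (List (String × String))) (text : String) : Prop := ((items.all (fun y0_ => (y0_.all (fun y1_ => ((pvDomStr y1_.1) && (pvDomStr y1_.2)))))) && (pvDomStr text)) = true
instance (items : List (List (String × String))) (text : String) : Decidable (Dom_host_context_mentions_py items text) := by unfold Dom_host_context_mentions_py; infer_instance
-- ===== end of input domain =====

-- B replaces the per-term substring scans over `text` with a precomputed hash index: it extracts
-- each item's terms in staged passes (two-pointer tokenizer with early stop at 6 runs), collects the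
-- set of needed term lengths, builds the set of all substrings of `text` of those lengths once, and
-- then filters items by set lookups instead of repeated `term in text` scans. Same return value.

-- the character class both Pythons test: CJK range or str.isalnum (shared verbatim by A and B)
def pvTermChar (c : Char) : Bool :=
  (decide ('\u4e00' ≤ c) && decide (c ≤ '\u9fff')) || PySem.Chars.isalnum c

-- ===== PORT A =====
-- A's tokenizer loop: state = (terms so far, current run), flush on a non-term char and at the end
def extractGoA : List Char → List String → List Char → List String
  | [], terms, current =>
      if 2 ≤ current.length ∧ current.length ≤ 12 then terms ++ [String.ofList current] else terms
  | c :: rest, terms, current =>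
      if pvTermChar c then extractGoA rest terms (current ++ [c])
      else if 2 ≤ current.length ∧ current.length ≤ 12 then
        extractGoA rest (terms ++ [String.ofList current]) []
      else extractGoA rest terms []

def extractShortTermsA (value : String) : List String :=
  (extractGoA value.toList [] []).take 6

-- loop body of A's main loop ('if not isinstance(item, dict): continue' never fires: items are dicts by type)
def mentionPredA (text : String) (item : List (String × String)) : Bool :=
  (([PySem.Str.strip (((PySem.Dict.mk item).get? "name").getD ""),
     PySem.Str.strip (((PySem.Dict.mk item).get? "kind").getD "")] ++
    extractShortTermsA (((PySem.Dict.mk item).get? "description").getD "")).take 8).any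
    (fun term => !(term == "") && (decide (2 ≤ PySem.Str.len term) && PySem.Str.isIn term text))

def host_context_mentions_py (items : List (List (String × String))) (text : String) : List (List (String × String)) :=
  items.foldl (fun acc item => if mentionPredA text item then acc ++ [item] else acc) []

-- ===== PORT B =====
-- Source B's two-pointer tokenizer: at a term char scan the whole run (inner j-loop = takeWhile),
-- keep it if its length is 2..12, stop as soon as 6 terms are collected (k = 6 - len(terms))
def extractGoB : List Char → Nat → List String
  | _, 0 => []
  | [], _ + 1 => []
  | c :: rest, k + 1 =>
      if pvTermChar c then
        let run := c :: rest.takeWhile pvTermChar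
        if 2 ≤ run.length ∧ run.length ≤ 12 then
          String.ofList run :: extractGoB (rest.dropWhile pvTermChar) k
        else
          extractGoB (rest.dropWhile pvTermChar) (k + 1)
      else extractGoB rest (k + 1)
termination_by cs _ => cs.length
decreasing_by
  · have := List.length_dropWhile_le pvTermChar rest; simp; omega
  · have := List.length_dropWhile_le pvTermChar rest; simp; omega
  · simp

def extractShortTermsB (value : String) : List String :=
  extractGoB value.toList 6

-- Source B's _item_terms (the 'if not isinstance(item, dict)' filter never fires: items are dicts by type)
def itemTermsB (item : List (String × String)) : List String :=
  [PySem.Str.strip (((PySem.Dict.mk item).get? "name").getD ""),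
   PySem.Str.strip (((PySem.Dict.mk item).get? "kind").getD "")] ++
  extractShortTermsB (((PySem.Dict.mk item).get? "description").getD "")

-- tagged = [(item, _item_terms(item)) for item in items]
def pvTagged (items : List (List (String × String))) :
    List ((List (String × String)) × List String) :=
  items.map (fun item => (item, itemTermsB item))

-- lengths = {len(t) for _, ts in tagged for t in ts if len(t) >= 2}
def pvLengths (tagged : List ((List (String × String)) × List String)) : PySem.Set Int :=
  PySem.Set.ofList (tagged.flatMap (fun p =>
    (p.2.filter (fun t => decide (2 ≤ PySem.Str.len t))).map PySem.Str.len))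

-- index = {text[i:i+n] for n in lengths for i in range(len(text) - n + 1)}
def pvIndex (text : String) (lengths : PySem.Set Int) : PySem.Set String :=
  PySem.Set.ofList (lengths.flatMap (fun n =>
    (PySem.List.pyRange 0 (PySem.Str.len text - n + 1) 1).map
      (fun i => PySem.Str.slice text (some i) (some (i + n)))))

def host_context_mentions_py_alt (items : List (List (String × String))) (text : String) : List (List (String × String)) :=
  let tagged := pvTagged items
  let lengths := pvLengths tagged
  let index := pvIndex text lengths
  (tagged.filter (fun p =>
    p.2.any (fun t => decide (2 ≤ PySem.Str.len t) && PySem.Set.contains index t))).map Prod.fst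

-- ===== PRECONDITION & SPEC =====
def Spec_host_context_mentions_py (items : List (List (String × String))) (text : String) (out : List (List (String × String))) : Prop := out = host_context_mentions_py_alt items text
instance (items : List (List (String × String))) (text : String) (out : List (List (String × String))) : Decidable (Spec_host_context_mentions_py items text out) := by unfold Spec_host_context_mentions_py; infer_instance

-- ===== CLAIM (what is proved, stated in full; the proofs are below) =====
def Claim_equal_host_context_mentions_py : Prop := ∀ (items : List (List (String × String))) (text : String), Dom_host_context_mentions_py items text → Spec_host_context_mentions_py items text (host_context_mentions_py items text)

-- ===== LEMMAS AND PROOFS =====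

-- proof-side view of both tokenizers: the maximal runs of pvTermChar-characters, in order
def runsOf (p : Char → Bool) : List Char → List (List Char)
  | [] => []
  | c :: rest =>
      if p c then (c :: rest.takeWhile p) :: runsOf p (rest.dropWhile p)
      else runsOf p rest
termination_by cs => cs.length
decreasing_by
  · have := List.length_dropWhile_le p rest; simp; omega
  · simp

-- "join, then keep runs of length 2..12" at the list level
def keepRuns (rs : List (List Char)) : List String :=
  (rs.filter (fun r => decide (2 ≤ r.length ∧ r.length ≤ 12))).map String.ofList

lemma keepRuns_nil : keepRuns [] = [] := rfl

lemma keepRuns_cons (r : List Char) (rs : List (List Char)) :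
    keepRuns (r :: rs) =
      (if 2 ≤ r.length ∧ r.length ≤ 12 then [String.ofList r] else []) ++ keepRuns rs := by
  by_cases h : 2 ≤ r.length ∧ r.length ≤ 12 <;> simp [keepRuns, h]

lemma keepRuns_append (as bs : List (List Char)) :
    keepRuns (as ++ bs) = keepRuns as ++ keepRuns bs := by
  simp [keepRuns, List.filter_append]

lemma extractGoA_prepend (cs : List Char) (terms : List String) (cur : List Char) :
    extractGoA cs terms cur = terms ++ extractGoA cs [] cur := by
  induction cs generalizing terms cur with
  | nil => simp only [extractGoA]; split <;> simp
  | cons c rest ih =>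
      simp only [extractGoA, List.nil_append]
      split
      · exact ih terms (cur ++ [c])
      · split
        · rw [ih (terms ++ [String.ofList cur]) [], ih [String.ofList cur] []]; simp
        · exact ih terms []

lemma runsOf_all (p : Char → Bool) (cur : List Char) (h : ∀ x ∈ cur, p x = true) :
    runsOf p cur = if cur = [] then [] else [cur] := by
  cases cur with
  | nil => simp [runsOf]
  | cons d cur' =>
      have hd : p d = true := h d (by simp)
      have hall : ∀ x ∈ cur', p x = true := fun x hx => h x (by simp [hx])
      simp [runsOf, hd, List.takeWhile_eq_self_iff.mpr hall,
            List.dropWhile_eq_nil_iff.mpr (fun x hx => hall x hx)]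

lemma runsOf_all_stop (p : Char → Bool) (cur : List Char) (c : Char) (rest : List Char)
    (h : ∀ x ∈ cur, p x = true) (hc : p c = false) :
    runsOf p (cur ++ c :: rest) = (if cur = [] then [] else [cur]) ++ runsOf p rest := by
  cases cur with
  | nil => simp [runsOf, hc]
  | cons d cur' =>
      have hd : p d = true := h d (by simp)
      have hall : ∀ x ∈ cur', p x = true := fun x hx => h x (by simp [hx])
      have htk : (cur' ++ c :: rest).takeWhile p = cur' := by
        rw [List.takeWhile_append]
        simp [List.takeWhile_eq_self_iff.mpr hall, hc]
      have hdr : (cur' ++ c :: rest).dropWhile p = c :: rest := by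
        rw [List.dropWhile_append]
        simp [List.dropWhile_eq_nil_iff.mpr (fun x hx => hall x hx), hc]
      simp [runsOf, hd, htk, hdr, hc]

lemma extractGoA_eq_keepRuns (cs cur : List Char) (h : ∀ x ∈ cur, pvTermChar x = true) :
    extractGoA cs [] cur = keepRuns (runsOf pvTermChar (cur ++ cs)) := by
  induction cs generalizing cur with
  | nil =>
      rw [List.append_nil, runsOf_all pvTermChar cur h]
      rcases eq_or_ne cur [] with hnil | hne
      · subst hnil; simp [extractGoA, keepRuns_nil]
      · simp only [if_neg hne, keepRuns_cons, keepRuns_nil, extractGoA]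
        split <;> simp
  | cons c rest ih =>
      simp only [extractGoA, List.nil_append]
      split
      · rename_i hp
        have h' : ∀ x ∈ cur ++ [c], pvTermChar x = true := by
          intro x hx; rcases List.mem_append.mp hx with hx | hx
          · exact h x hx
          · simp at hx; simpa [hx] using hp
        rw [ih (cur ++ [c]) h']
        simp
      · rename_i hp
        have hc : pvTermChar c = false := by simpa using hp
        rw [runsOf_all_stop pvTermChar cur c rest h hc, keepRuns_append, ih [] (by simp),
            List.nil_append]
        split
        · rename_i hcond
          have hne : cur ≠ [] := by
            intro hnil; subst hnil; simp at hcond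
          rw [extractGoA_prepend rest [String.ofList cur] [], ih [] (by simp), List.nil_append]
          simp [hne, keepRuns_cons, hcond, keepRuns_nil]
        · rename_i hcond
          rcases eq_or_ne cur [] with hnil | hne
          · simp [hnil, keepRuns_nil]
          · simp [hne, keepRuns_cons, hcond, keepRuns_nil]

-- B's two-pointer loop computes the first k kept runs
lemma extractGoB_eq_keepRuns (cs : List Char) (k : Nat) :
    extractGoB cs k = (keepRuns (runsOf pvTermChar cs)).take k := by
  induction cs, k using extractGoB.induct with
  | case1 cs => simp [extractGoB]
  | case2 k => simp [extractGoB, runsOf, keepRuns_nil]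
  | case3 c rest k hp run hgood ih =>
      rw [extractGoB, runsOf]
      simp only [hp, if_true, keepRuns_cons]
      split_ifs with hgd
      · simp [ih]
      · exact absurd hgood hgd
  | case4 c rest k hp run hbad ih =>
      rw [extractGoB, runsOf]
      simp only [hp, if_true, keepRuns_cons]
      split_ifs with hgd
      · exact absurd hgd hbad
      · simpa using ih
  | case5 c rest k hp ih =>
      rw [extractGoB, runsOf]
      simp only [hp, if_neg, Bool.false_eq_true, not_false_eq_true]
      exact ih

lemma extractA_eq_extractB (value : String) :
    extractShortTermsA value = extractShortTermsB value := by
  unfold extractShortTermsA extractShortTermsB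
  rw [extractGoA_eq_keepRuns value.toList [] (by simp), List.nil_append,
      extractGoB_eq_keepRuns]

lemma itemTermsB_length_le (item : List (String × String)) : (itemTermsB item).length ≤ 8 := by
  unfold itemTermsB extractShortTermsB
  rw [extractGoB_eq_keepRuns]
  have := List.length_take_le 6 (keepRuns (runsOf pvTermChar
    ((((PySem.Dict.mk item).get? "description").getD "").toList)))
  simp
  omega

-- every element of the lengths set is ≥ 2
lemma pvLengths_ge_two (tagged : List ((List (String × String)) × List String)) (n : Int)
    (hn : n ∈ pvLengths tagged) : 2 ≤ n := by
  unfold pvLengths at hn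
  rw [PySem.Set.mem_ofList, List.mem_flatMap] at hn
  obtain ⟨p, _, hn⟩ := hn
  rw [List.mem_map] at hn
  obtain ⟨t, ht, rfl⟩ := hn
  have := List.of_mem_filter ht
  simpa using this

-- the length of every admitted term of every item is in the lengths set
lemma len_mem_pvLengths (items : List (List (String × String))) (item : List (String × String))
    (t : String) (hitem : item ∈ items) (ht : t ∈ itemTermsB item) (h2 : 2 ≤ PySem.Str.len t) :
    PySem.Str.len t ∈ pvLengths (pvTagged items) := by
  unfold pvLengths
  rw [PySem.Set.mem_ofList, List.mem_flatMap]
  refine ⟨(item, itemTermsB item), List.mem_map_of_mem hitem, ?_⟩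
  rw [List.mem_map]
  exact ⟨t, List.mem_filter.mpr ⟨ht, by simpa using h2⟩, rfl⟩

-- a set-index lookup is exactly Python's 'term in text' when the term's length is indexed
lemma contains_pvIndex (text : String) (S : PySem.Set Int) (hS : ∀ n ∈ S, 2 ≤ n)
    (t : String) (ht : PySem.Str.len t ∈ S) :
    PySem.Set.contains (pvIndex text S) t = PySem.Str.isIn t text := by
  rw [Bool.eq_iff_iff, PySem.Set.contains_iff, PySem.Str.isIn_iff_infix]
  unfold pvIndex
  rw [PySem.Set.mem_ofList, List.mem_flatMap]
  constructor
  · rintro ⟨n, hnS, hmem⟩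
    rw [List.mem_map] at hmem
    obtain ⟨i, hi, rfl⟩ := hmem
    rw [PySem.List.mem_pyRange_one] at hi
    have h2 : 2 ≤ n := hS n hnS
    simp only [PySem.Str.toList_slice, PySem.Chars.slice_eq_listSlice]
    rw [PySem.List.slice_toNat text.toList (by omega) (by omega)]
    exact (List.take_prefix _ _).isInfix.trans (List.drop_suffix _ _).isInfix
  · intro hinf
    obtain ⟨p, s, hps⟩ := hinf
    have hlen : p.length + (t.toList.length + s.length) = text.toList.length := by
      simpa using congrArg List.length hps
    have hlt : PySem.Str.len t = (t.toList.length : Int) := by simp [PySem.Str.len_eq]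
    have hLtext : PySem.Str.len text = (text.toList.length : Int) := by simp [PySem.Str.len_eq]
    refine ⟨PySem.Str.len t, ht, ?_⟩
    rw [List.mem_map]
    refine ⟨(p.length : Int), ?_, ?_⟩
    · rw [PySem.List.mem_pyRange_one, hlt, hLtext]
      constructor
      · positivity
      · omega
    · apply String.toList_inj.mp
      simp only [PySem.Str.toList_slice, PySem.Chars.slice_eq_listSlice]
      rw [hlt, PySem.List.slice_natCast_add, ← hps, List.append_assoc, List.drop_left,
          List.take_left]

-- the per-item predicates of A and B agree (for items of the list, so their lengths are indexed)
lemma predA_eq_predB (items : List (List (String × String))) (text : String)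
    (item : List (String × String)) (hitem : item ∈ items) :
    mentionPredA text item =
      (itemTermsB item).any (fun t =>
        decide (2 ≤ PySem.Str.len t) &&
        PySem.Set.contains (pvIndex text (pvLengths (pvTagged items))) t) := by
  unfold mentionPredA
  have hterms : [PySem.Str.strip (((PySem.Dict.mk item).get? "name").getD ""),
      PySem.Str.strip (((PySem.Dict.mk item).get? "kind").getD "")] ++
      extractShortTermsA (((PySem.Dict.mk item).get? "description").getD "") = itemTermsB item := by
    unfold itemTermsB
    rw [extractA_eq_extractB]
  rw [hterms, List.take_of_length_le (itemTermsB_length_le item)]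
  refine PySem.List.any_congr_mem (fun t ht => ?_)
  by_cases h2 : 2 ≤ PySem.Str.len t
  · have hne : t ≠ "" := by
      rintro rfl
      simp [PySem.Str.len_eq] at h2
    rw [contains_pvIndex text _ (pvLengths_ge_two (pvTagged items))
        t (len_mem_pvLengths items item t hitem ht h2)]
    simp [hne]
  · rw [decide_eq_false h2]
    simp

-- pulling Prod.fst through the tagged filter, one cons at a time (avoids heavy defeq checks)
lemma filter_fst_aux (text : String) (S : PySem.Set Int) (l : List (List (String × String)))
    (hl : ∀ item ∈ l, mentionPredA text item = (itemTermsB item).any (fun t =>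
        decide (2 ≤ PySem.Str.len t) && PySem.Set.contains (pvIndex text S) t)) :
    l.filter (mentionPredA text) =
      ((l.map (fun item => (item, itemTermsB item))).filter (fun p => p.2.any (fun t =>
        decide (2 ≤ PySem.Str.len t) && PySem.Set.contains (pvIndex text S) t))).map Prod.fst := by
  induction l with
  | nil => rfl
  | cons item rest ih =>
      have hitem := hl item (List.mem_cons_self ..)
      have hrest := ih (fun x hx => hl x (List.mem_cons_of_mem item hx))
      simp only [List.map_cons, List.filter_cons]
      rw [← hitem]
      cases hb : mentionPredA text item <;> simp [hrest]

-- ===== VERDICT (by name: the statement is the Claim_ definition above) =====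
theorem host_context_mentions_py_spec : Claim_equal_host_context_mentions_py := by
  intro items text _
  unfold Spec_host_context_mentions_py host_context_mentions_py host_context_mentions_py_alt
  have h := PySem.List.foldl_append_if (mentionPredA text) id items []
  simp only [id_eq, List.map_id, List.nil_append] at h
  rw [h]
  show List.filter (mentionPredA text) items =
    List.map Prod.fst (List.filter
      (fun p => p.2.any fun t => decide (2 ≤ PySem.Str.len t) &&
        PySem.Set.contains (pvIndex text (pvLengths (pvTagged items))) t)
      (List.map (fun item => (item, itemTermsB item)) items))
  exact filter_fst_aux text (pvLengths (pvTagged items)) items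
    (fun item hitem => predA_eq_predB items text item hitem)
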